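-- pv_equiv track=rewrite | github.com/javierg98/diet-driven-health | backend/scripts/enrich_recipes.py | estimate_nutrition
-- ===== SOURCE A (Python) =====
-- NUTRITION_ESTIMATES = {
--     # Proteins (per ~4oz serving)
--     "chicken": {"calories": 165, "protein": 31, "sodium": 74, "potassium": 256, "phosphorus": 196},
--     "beef": {"calories": 250, "protein": 26, "sodium": 66, "potassium": 318, "phosphorus": 175},
--     "salmon": {"calories": 208, "protein": 20, "sodium": 59, "potassium": 363, "phosphorus": 252},
--     "shrimp": {"calories": 85, "protein": 20, "sodium": 292, "potassium": 182, "phosphorus": 201},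
--     "tuna": {"calories": 130, "protein": 29, "sodium": 40, "potassium": 237, "phosphorus": 254},
--     "cod": {"calories": 82, "protein": 18, "sodium": 54, "potassium": 413, "phosphorus": 203},
--     "pork": {"calories": 242, "protein": 27, "sodium": 62, "potassium": 362, "phosphorus": 220},
--     "lamb": {"calories": 258, "protein": 25, "sodium": 72, "potassium": 310, "phosphorus": 188},
--     "turkey": {"calories": 135, "protein": 30, "sodium": 60, "potassium": 249, "phosphorus": 196},
--     "egg": {"calories": 78, "protein": 6, "sodium": 62, "potassium": 63, "phosphorus": 86},
--     "tofu": {"calories": 80, "protein": 9, "sodium": 8, "potassium": 150, "phosphorus": 120},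
--     # Grains (per ~1 cup cooked)
--     "rice": {"calories": 206, "protein": 4, "sodium": 1, "potassium": 55, "phosphorus": 68},
--     "pasta": {"calories": 220, "protein": 8, "sodium": 1, "potassium": 44, "phosphorus": 58},
--     "oats": {"calories": 150, "protein": 5, "sodium": 2, "potassium": 164, "phosphorus": 180},
--     "quinoa": {"calories": 222, "protein": 8, "sodium": 13, "potassium": 318, "phosphorus": 281},
--     "bread": {"calories": 75, "protein": 3, "sodium": 132, "potassium": 37, "phosphorus": 33},
--     "tortilla": {"calories": 120, "protein": 3, "sodium": 200, "potassium": 50, "phosphorus": 60},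
--     # Vegetables (per ~1 cup)
--     "broccoli": {"calories": 55, "protein": 4, "sodium": 64, "potassium": 457, "phosphorus": 105},
--     "spinach": {"calories": 41, "protein": 5, "sodium": 126, "potassium": 839, "phosphorus": 100},
--     "carrot": {"calories": 52, "protein": 1, "sodium": 88, "potassium": 410, "phosphorus": 45},
--     "onion": {"calories": 46, "protein": 1, "sodium": 5, "potassium": 190, "phosphorus": 36},
--     "garlic": {"calories": 5, "protein": 0, "sodium": 1, "potassium": 12, "phosphorus": 5},
--     "tomato": {"calories": 32, "protein": 2, "sodium": 9, "potassium": 427, "phosphorus": 43},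
--     "pepper": {"calories": 30, "protein": 1, "sodium": 4, "potassium": 210, "phosphorus": 26},
--     "potato": {"calories": 163, "protein": 4, "sodium": 13, "potassium": 897, "phosphorus": 121},
--     "sweet potato": {"calories": 114, "protein": 2, "sodium": 73, "potassium": 448, "phosphorus": 63},
--     "zucchini": {"calories": 20, "protein": 2, "sodium": 12, "potassium": 324, "phosphorus": 48},
--     "avocado": {"calories": 160, "protein": 2, "sodium": 7, "potassium": 485, "phosphorus": 52},
--     "cucumber": {"calories": 16, "protein": 1, "sodium": 2, "potassium": 152, "phosphorus": 24},
--     "lettuce": {"calories": 10, "protein": 1, "sodium": 10, "potassium": 141, "phosphorus": 20},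
--     # Legumes (per ~1 cup cooked)
--     "beans": {"calories": 225, "protein": 15, "sodium": 2, "potassium": 655, "phosphorus": 251},
--     "lentils": {"calories": 230, "protein": 18, "sodium": 4, "potassium": 731, "phosphorus": 356},
--     "chickpeas": {"calories": 269, "protein": 15, "sodium": 11, "potassium": 474, "phosphorus": 276},
--     # Fats (per tbsp)
--     "olive oil": {"calories": 119, "protein": 0, "sodium": 0, "potassium": 0, "phosphorus": 0},
--     "butter": {"calories": 102, "protein": 0, "sodium": 91, "potassium": 3, "phosphorus": 3},
--     "coconut oil": {"calories": 121, "protein": 0, "sodium": 0, "potassium": 0, "phosphorus": 0},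
-- }
--
-- def estimate_nutrition(ingredient_names: list[str]) -> dict:
--     """Estimate per-serving nutrition from ingredient composition."""
--     total = {"calories": 0, "protein": 0, "sodium": 0, "potassium": 0, "phosphorus": 0}
--     matched = 0
--
--     for name in ingredient_names:
--         for key, values in NUTRITION_ESTIMATES.items():
--             if key in name:
--                 for nutrient in total:
--                     total[nutrient] += values[nutrient]
--                 matched += 1
--                 break
--
--     # If few matches, add baseline (unmapped ingredients contribute ~30cal each)
--     unmatched = len(ingredient_names) - matched
--     total["calories"] += unmatched * 30
--     total["sodium"] += unmatched * 20
--
--     # Divide by ~4 servings to get per-serving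
--     servings = 4
--     return {k: round(v / servings) for k, v in total.items()}
-- ===== SOURCE B (Python) =====
-- NUTRITION_ESTIMATES = {
--     "chicken": {"calories": 165, "protein": 31, "sodium": 74, "potassium": 256, "phosphorus": 196},
--     "beef": {"calories": 250, "protein": 26, "sodium": 66, "potassium": 318, "phosphorus": 175},
--     "salmon": {"calories": 208, "protein": 20, "sodium": 59, "potassium": 363, "phosphorus": 252},
--     "shrimp": {"calories": 85, "protein": 20, "sodium": 292, "potassium": 182, "phosphorus": 201},
--     "tuna": {"calories": 130, "protein": 29, "sodium": 40, "potassium": 237, "phosphorus": 254},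
--     "cod": {"calories": 82, "protein": 18, "sodium": 54, "potassium": 413, "phosphorus": 203},
--     "pork": {"calories": 242, "protein": 27, "sodium": 62, "potassium": 362, "phosphorus": 220},
--     "lamb": {"calories": 258, "protein": 25, "sodium": 72, "potassium": 310, "phosphorus": 188},
--     "turkey": {"calories": 135, "protein": 30, "sodium": 60, "potassium": 249, "phosphorus": 196},
--     "egg": {"calories": 78, "protein": 6, "sodium": 62, "potassium": 63, "phosphorus": 86},
--     "tofu": {"calories": 80, "protein": 9, "sodium": 8, "potassium": 150, "phosphorus": 120},
--     "rice": {"calories": 206, "protein": 4, "sodium": 1, "potassium": 55, "phosphorus": 68},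
--     "pasta": {"calories": 220, "protein": 8, "sodium": 1, "potassium": 44, "phosphorus": 58},
--     "oats": {"calories": 150, "protein": 5, "sodium": 2, "potassium": 164, "phosphorus": 180},
--     "quinoa": {"calories": 222, "protein": 8, "sodium": 13, "potassium": 318, "phosphorus": 281},
--     "bread": {"calories": 75, "protein": 3, "sodium": 132, "potassium": 37, "phosphorus": 33},
--     "tortilla": {"calories": 120, "protein": 3, "sodium": 200, "potassium": 50, "phosphorus": 60},
--     "broccoli": {"calories": 55, "protein": 4, "sodium": 64, "potassium": 457, "phosphorus": 105},
--     "spinach": {"calories": 41, "protein": 5, "sodium": 126, "potassium": 839, "phosphorus": 100},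
--     "carrot": {"calories": 52, "protein": 1, "sodium": 88, "potassium": 410, "phosphorus": 45},
--     "onion": {"calories": 46, "protein": 1, "sodium": 5, "potassium": 190, "phosphorus": 36},
--     "garlic": {"calories": 5, "protein": 0, "sodium": 1, "potassium": 12, "phosphorus": 5},
--     "tomato": {"calories": 32, "protein": 2, "sodium": 9, "potassium": 427, "phosphorus": 43},
--     "pepper": {"calories": 30, "protein": 1, "sodium": 4, "potassium": 210, "phosphorus": 26},
--     "potato": {"calories": 163, "protein": 4, "sodium": 13, "potassium": 897, "phosphorus": 121},
--     "sweet potato": {"calories": 114, "protein": 2, "sodium": 73, "potassium": 448, "phosphorus": 63},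
--     "zucchini": {"calories": 20, "protein": 2, "sodium": 12, "potassium": 324, "phosphorus": 48},
--     "avocado": {"calories": 160, "protein": 2, "sodium": 7, "potassium": 485, "phosphorus": 52},
--     "cucumber": {"calories": 16, "protein": 1, "sodium": 2, "potassium": 152, "phosphorus": 24},
--     "lettuce": {"calories": 10, "protein": 1, "sodium": 10, "potassium": 141, "phosphorus": 20},
--     "beans": {"calories": 225, "protein": 15, "sodium": 2, "potassium": 655, "phosphorus": 251},
--     "lentils": {"calories": 230, "protein": 18, "sodium": 4, "potassium": 731, "phosphorus": 356},
--     "chickpeas": {"calories": 269, "protein": 15, "sodium": 11, "potassium": 474, "phosphorus": 276},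
--     "olive oil": {"calories": 119, "protein": 0, "sodium": 0, "potassium": 0, "phosphorus": 0},
--     "butter": {"calories": 102, "protein": 0, "sodium": 91, "potassium": 3, "phosphorus": 3},
--     "coconut oil": {"calories": 121, "protein": 0, "sodium": 0, "potassium": 0, "phosphorus": 0},
-- }
--
--
-- def estimate_nutrition(ingredient_names: list[str]) -> dict:
--     """Estimate per-serving nutrition, table-major.
--
--     Instead of scanning the table per ingredient (first match wins), walk the
--     table keys in insertion order over the shrinking list of still-unmatched
--     names: each key claims every remaining name containing it, contributing its
--     values multiplied by the claim count.  A name is claimed by exactly the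
--     first key (in table order) it contains, so the totals are identical.
--     """
--     remaining = list(ingredient_names)
--     totals = {"calories": 0, "protein": 0, "sodium": 0, "potassium": 0, "phosphorus": 0}
--     for key, values in NUTRITION_ESTIMATES.items():
--         cnt = 0
--         rest = []
--         for name in remaining:
--             if key in name:
--                 cnt += 1
--             else:
--                 rest.append(name)
--         if cnt:
--             for nutrient in totals:
--                 totals[nutrient] += values[nutrient] * cnt
--         remaining = rest
--     unmatched = len(remaining)
--     totals["calories"] += unmatched * 30
--     totals["sodium"] += unmatched * 20
--     return {k: round(v / 4) for k, v in totals.items()}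
-- ===== Notes on version B (the rewrite author's own statement) =====
-- stated objective: alternative
-- what changed: A is name-major (for each ingredient, scan the table and take the first matching key); B is table-major: it walks the table keys once in insertion order over a shrinking list of still-unmatched names, each key claiming every remaining name containing it and adding its values multiplied by the claim count, so the per-name first-match inner scan disappears.
import Mathlib
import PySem

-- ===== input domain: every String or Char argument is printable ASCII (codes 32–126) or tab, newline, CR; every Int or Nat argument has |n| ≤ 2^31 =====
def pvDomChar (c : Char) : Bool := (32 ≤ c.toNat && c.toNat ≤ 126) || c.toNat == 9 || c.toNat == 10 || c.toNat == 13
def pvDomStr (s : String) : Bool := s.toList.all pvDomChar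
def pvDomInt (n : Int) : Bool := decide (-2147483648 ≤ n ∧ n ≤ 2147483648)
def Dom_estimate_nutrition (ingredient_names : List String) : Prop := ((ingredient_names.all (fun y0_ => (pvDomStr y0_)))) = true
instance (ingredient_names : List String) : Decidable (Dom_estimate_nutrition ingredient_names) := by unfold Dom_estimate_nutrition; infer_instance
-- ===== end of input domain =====

-- B replaces A's name-major loop (first-match table scan per ingredient) by a table-major
-- sweep over a shrinking list of unmatched names (values × claim count per key); objective: alternative, not faster.

-- The NUTRITION_ESTIMATES dict, shared data of both programs:
-- rows are (key, calories, protein, sodium, potassium, phosphorus) in insertion order.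
def pvTable : List (String × Int × Int × Int × Int × Int) := [
  ("chicken", 165, 31, 74, 256, 196),
  ("beef", 250, 26, 66, 318, 175),
  ("salmon", 208, 20, 59, 363, 252),
  ("shrimp", 85, 20, 292, 182, 201),
  ("tuna", 130, 29, 40, 237, 254),
  ("cod", 82, 18, 54, 413, 203),
  ("pork", 242, 27, 62, 362, 220),
  ("lamb", 258, 25, 72, 310, 188),
  ("turkey", 135, 30, 60, 249, 196),
  ("egg", 78, 6, 62, 63, 86),
  ("tofu", 80, 9, 8, 150, 120),
  ("rice", 206, 4, 1, 55, 68),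
  ("pasta", 220, 8, 1, 44, 58),
  ("oats", 150, 5, 2, 164, 180),
  ("quinoa", 222, 8, 13, 318, 281),
  ("bread", 75, 3, 132, 37, 33),
  ("tortilla", 120, 3, 200, 50, 60),
  ("broccoli", 55, 4, 64, 457, 105),
  ("spinach", 41, 5, 126, 839, 100),
  ("carrot", 52, 1, 88, 410, 45),
  ("onion", 46, 1, 5, 190, 36),
  ("garlic", 5, 0, 1, 12, 5),
  ("tomato", 32, 2, 9, 427, 43),
  ("pepper", 30, 1, 4, 210, 26),
  ("potato", 163, 4, 13, 897, 121),
  ("sweet potato", 114, 2, 73, 448, 63),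
  ("zucchini", 20, 2, 12, 324, 48),
  ("avocado", 160, 2, 7, 485, 52),
  ("cucumber", 16, 1, 2, 152, 24),
  ("lettuce", 10, 1, 10, 141, 20),
  ("beans", 225, 15, 2, 655, 251),
  ("lentils", 230, 18, 4, 731, 356),
  ("chickpeas", 269, 15, 11, 474, 276),
  ("olive oil", 119, 0, 0, 0, 0),
  ("butter", 102, 0, 91, 3, 3),
  ("coconut oil", 121, 0, 0, 0, 0)]

-- Exact port of Python round(v / 4) for an int v (used by both Pythons): v/4 is exact as a
-- float, so round is round-half-to-even of the rational v/4 (q = floor, r = remainder; r = 2 is the half case).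
def pvRound4 (v : Int) : Int :=
  let q := PySem.Int.floordiv v 4
  let r := PySem.Int.mod v 4
  if r = 0 ∨ r = 1 then q
  else if r = 3 then q + 1
  else if PySem.Int.mod q 2 = 0 then q else q + 1

-- ===== PORT A =====
-- A's inner `for key, values in NUTRITION_ESTIMATES.items(): if key in name: … break`,
-- threading A's running state (calories, protein, sodium, potassium, phosphorus, matched).
def pvInnerA (name : String) :
    List (String × Int × Int × Int × Int × Int) →
    (Int × Int × Int × Int × Int × Int) → (Int × Int × Int × Int × Int × Int)
  | [], st => st
  | (k, c, p, s, pt, ph) :: rest, (tc, tp, ts, tpt, tph, m) =>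
    if PySem.Str.isIn k name then (tc + c, tp + p, ts + s, tpt + pt, tph + ph, m + 1)
    else pvInnerA name rest (tc, tp, ts, tpt, tph, m)

def estimate_nutrition (ingredient_names : List String) : List (String × Int) :=
  let st := ingredient_names.foldl (fun st name => pvInnerA name pvTable st) (0, 0, 0, 0, 0, 0)
  match st with
  | (c, p, s, pt, ph, m) =>
    let unmatched : Int := (ingredient_names.length : Int) - m
    [("calories", pvRound4 (c + unmatched * 30)),
     ("protein", pvRound4 p),
     ("sodium", pvRound4 (s + unmatched * 20)),
     ("potassium", pvRound4 pt),
     ("phosphorus", pvRound4 ph)]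

-- ===== PORT B =====
-- Source B's inner loop over `remaining`: count the names containing key, keep the others (in order).
def pvCount (key : String) : List String → Int × List String
  | [] => (0, [])
  | n :: t =>
    let (c, r) := pvCount key t
    if PySem.Str.isIn key n then (c + 1, r) else (c, n :: r)

-- one step of Source B's outer loop over the table: state = (remaining, calories, protein, sodium, potassium, phosphorus)
def pvStepB (st : List String × Int × Int × Int × Int × Int)
    (row : String × Int × Int × Int × Int × Int) : List String × Int × Int × Int × Int × Int :=
  match st, row with
  | (rem, tc, tp, ts, tpt, tph), (k, c, p, s, pt, ph) =>
    let cr := pvCount k rem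
    (cr.2, tc + c * cr.1, tp + p * cr.1, ts + s * cr.1, tpt + pt * cr.1, tph + ph * cr.1)

def estimate_nutrition_alt (ingredient_names : List String) : List (String × Int) :=
  match pvTable.foldl pvStepB (ingredient_names, 0, 0, 0, 0, 0) with
  | (rem, c, p, s, pt, ph) =>
    let unmatched : Int := (rem.length : Int)
    [("calories", pvRound4 (c + unmatched * 30)),
     ("protein", pvRound4 p),
     ("sodium", pvRound4 (s + unmatched * 20)),
     ("potassium", pvRound4 pt),
     ("phosphorus", pvRound4 ph)]

-- ===== PRECONDITION & SPEC =====
def Spec_estimate_nutrition (ingredient_names : List String) (out : List (String × Int)) : Prop := out = estimate_nutrition_alt ingredient_names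
instance (ingredient_names : List String) (out : List (String × Int)) : Decidable (Spec_estimate_nutrition ingredient_names out) := by unfold Spec_estimate_nutrition; infer_instance

-- ===== CLAIM (what is proved, stated in full; the proofs are below) =====
def Claim_equal_estimate_nutrition : Prop := ∀ (ingredient_names : List String), Dom_estimate_nutrition ingredient_names → Spec_estimate_nutrition ingredient_names (estimate_nutrition ingredient_names)

-- ===== LEMMAS AND PROOFS =====

-- first-match value of `name` in a table (the canonical form both loops are reduced to)
def pvFM (t : List (String × Int × Int × Int × Int × Int)) (name : String) :
    Option (Int × Int × Int × Int × Int) :=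
  (t.find? (fun kv => PySem.Str.isIn kv.1 name)).map (·.2)

-- A's inner loop over a table is: add the first matching row's values (if any) and bump matched.
theorem pvInnerA_eq (name : String) (t : List (String × Int × Int × Int × Int × Int))
    (tc tp ts tpt tph m : Int) :
    pvInnerA name t (tc, tp, ts, tpt, tph, m) =
      match pvFM t name with
      | none => (tc, tp, ts, tpt, tph, m)
      | some (c, p, s, pt, ph) => (tc + c, tp + p, ts + s, tpt + pt, tph + ph, m + 1) := by
  induction t with
  | nil => simp [pvInnerA, pvFM]
  | cons kv rest ih =>
    obtain ⟨k, c, p, s, pt, ph⟩ := kv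
    cases h : PySem.Chars.isIn k.toList name.toList with
    | true => simp [pvInnerA, pvFM, PySem.Str.isIn, List.find?, h]
    | false => simp [pvInnerA, pvFM, PySem.Str.isIn, List.find?, h, ih]

-- A's whole loop computes the componentwise sums over the first-match hits (matched = #hits).
theorem pvLoopA_eq (t : List (String × Int × Int × Int × Int × Int)) (names : List String)
    (tc tp ts tpt tph m : Int) :
    names.foldl (fun st name => pvInnerA name t st) (tc, tp, ts, tpt, tph, m) =
      (tc + (((names.filterMap (pvFM t))).map (·.1)).sum,
       tp + (((names.filterMap (pvFM t))).map (·.2.1)).sum,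
       ts + (((names.filterMap (pvFM t))).map (·.2.2.1)).sum,
       tpt + (((names.filterMap (pvFM t))).map (·.2.2.2.1)).sum,
       tph + (((names.filterMap (pvFM t))).map (·.2.2.2.2)).sum,
       m + (((names.filterMap (pvFM t))).length : Int)) := by
  induction names generalizing tc tp ts tpt tph m with
  | nil => simp
  | cons name rest ih =>
    rw [List.foldl_cons, pvInnerA_eq]
    cases h : pvFM t name with
    | none =>
      rw [ih]; simp only [List.filterMap_cons, h]
    | some v =>
      obtain ⟨c, p, s, pt, ph⟩ := v
      rw [ih]
      simp only [List.filterMap_cons, h, List.map_cons, List.sum_cons, List.length_cons,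
        Prod.mk.injEq]
      push_cast
      omega

-- Source B's single-pass count-and-keep equals (count of matches, filter of non-matches).
theorem pvCount_eq (key : String) (R : List String) :
    pvCount key R =
      (((R.filter (fun n => PySem.Str.isIn key n)).length : Int),
       R.filter (fun n => !PySem.Str.isIn key n)) := by
  induction R with
  | nil => simp [pvCount]
  | cons n t ih =>
    cases h : PySem.Chars.isIn key.toList n.toList with
    | true => simp [pvCount, ih, PySem.Str.isIn, h]
    | false => simp [pvCount, ih, PySem.Str.isIn, h]

-- splitting off the head row of the table: the first-match hits of R against (k,v)::rest are,
-- up to permutation, cnt copies of v (cnt = #names containing k) together with the hits of the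
-- k-free names against rest.
theorem pvSplit_perm (k : String) (v : Int × Int × Int × Int × Int)
    (rest : List (String × Int × Int × Int × Int × Int)) (R : List String) :
    (R.filterMap (pvFM ((k, v) :: rest))).Perm
      (List.replicate (R.filter (fun n => PySem.Str.isIn k n)).length v ++
        (R.filter (fun n => !PySem.Str.isIn k n)).filterMap (pvFM rest)) := by
  induction R with
  | nil => simp
  | cons n R' ih =>
    cases h : PySem.Chars.isIn k.toList n.toList with
    | true =>
      have hfm : pvFM ((k, v) :: rest) n = some v := by
        simp [pvFM, List.find?, PySem.Str.isIn, h]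
      have hp : PySem.Str.isIn k n = true := h
      simp only [List.filterMap_cons, hfm, List.filter_cons, hp, Bool.not_true, if_true,
        Bool.false_eq_true, if_false, List.length_cons, List.replicate_succ, List.cons_append]
      exact ih.cons v
    | false =>
      have hfm : pvFM ((k, v) :: rest) n = pvFM rest n := by
        simp [pvFM, List.find?, PySem.Str.isIn, h]
      have hp : PySem.Str.isIn k n = false := h
      simp only [List.filterMap_cons, hfm, List.filter_cons, hp, Bool.not_false, if_true,
        Bool.false_eq_true, if_false]
      cases hr : pvFM rest n with
      | none => simpa using ih
      | some r =>
        exact (ih.cons r).trans List.perm_middle.symm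

-- unfolding the head of the table in the no-match predicate, pointwise.
theorem pvFM_cons_isNone (k : String) (v : Int × Int × Int × Int × Int)
    (rest : List (String × Int × Int × Int × Int × Int)) (n : String) :
    (pvFM ((k, v) :: rest) n).isNone =
      (!PySem.Str.isIn k n && (pvFM rest n).isNone) := by
  cases h : PySem.Chars.isIn k.toList n.toList <;>
    simp [pvFM, List.find?, PySem.Str.isIn, h]

-- B's outer fold computes exactly A's canonical sums, with `remaining` = the names with no match.
theorem pvLoopB_eq (t : List (String × Int × Int × Int × Int × Int)) (R : List String)
    (tc tp ts tpt tph : Int) :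
    t.foldl pvStepB (R, tc, tp, ts, tpt, tph) =
      (R.filter (fun n => (pvFM t n).isNone),
       tc + (((R.filterMap (pvFM t))).map (·.1)).sum,
       tp + (((R.filterMap (pvFM t))).map (·.2.1)).sum,
       ts + (((R.filterMap (pvFM t))).map (·.2.2.1)).sum,
       tpt + (((R.filterMap (pvFM t))).map (·.2.2.2.1)).sum,
       tph + (((R.filterMap (pvFM t))).map (·.2.2.2.2)).sum) := by
  induction t generalizing R tc tp ts tpt tph with
  | nil => simp [pvFM]
  | cons row rest ih =>
    obtain ⟨k, c, p, s, pt, ph⟩ := row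
    rw [List.foldl_cons]
    show rest.foldl pvStepB (pvStepB (R, tc, tp, ts, tpt, tph) (k, c, p, s, pt, ph)) = _
    simp only [pvStepB, pvCount_eq]
    rw [ih]
    have hperm := pvSplit_perm k (c, p, s, pt, ph) rest R
    have hs : ∀ f : Int × Int × Int × Int × Int → Int,
        ((R.filterMap (pvFM ((k, (c, p, s, pt, ph)) :: rest))).map f).sum
          = f (c, p, s, pt, ph) * ((R.filter (fun n => PySem.Str.isIn k n)).length : Int)
            + (((R.filter (fun n => !PySem.Str.isIn k n)).filterMap (pvFM rest)).map f).sum := by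
      intro f
      rw [(hperm.map f).sum_eq]
      simp [List.sum_replicate, mul_comm]
    have hfil : R.filter (fun n => (pvFM ((k, (c, p, s, pt, ph)) :: rest) n).isNone)
        = (R.filter (fun n => !PySem.Str.isIn k n)).filter (fun n => (pvFM rest n).isNone) := by
      rw [List.filter_filter]
      refine List.filter_congr fun n _ => ?_
      rw [pvFM_cons_isNone]
      exact Bool.and_comm _ _
    rw [hfil, hs (fun x => x.1), hs (fun x => x.2.1), hs (fun x => x.2.2.1),
      hs (fun x => x.2.2.2.1), hs (fun x => x.2.2.2.2)]
    refine Prod.ext rfl (Prod.ext ?_ (Prod.ext ?_ (Prod.ext ?_ (Prod.ext ?_ ?_)))) <;>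
      (show (_ : Int) = _; ring)

-- every name is either a hit or left in `remaining`.
theorem pvLen_split (t : List (String × Int × Int × Int × Int × Int)) (R : List String) :
    (R.filterMap (pvFM t)).length + (R.filter (fun n => (pvFM t n).isNone)).length = R.length := by
  induction R with
  | nil => simp
  | cons n R' ih =>
    cases h : pvFM t n with
    | none => simp [h]; omega
    | some v => simp [h]; omega

-- ===== VERDICT (by name: the statement is the Claim_ definition above) =====
theorem estimate_nutrition_spec : Claim_equal_estimate_nutrition := by
  intro names _
  show _ = _
  unfold estimate_nutrition estimate_nutrition_alt
  rw [pvLoopB_eq, pvLoopA_eq]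
  have h := pvLen_split pvTable names
  have hlen : ((names.filter (fun n => (pvFM pvTable n).isNone)).length : Int)
      = (names.length : Int) - (((names.filterMap (pvFM pvTable)).length : Int)) := by omega
  simp only [zero_add, hlen]
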